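-- pv_equiv track=rewrite | github.com/ruthaleks/hackerank | jump_on_clouds/main.py | jump_on_clouds
-- ===== SOURCE A (Python) =====
-- def min_jumps(clouds):
--     return clouds // 2 + 1
--
-- def jump_on_clouds(data):
--     obst_idx = [i for i, v in enumerate(data) if v == 1]
--     if len(obst_idx) > 0:
--         diff = [obst_idx[i+1]-obst_idx[i]-1 for i in range(len(obst_idx)-1)]
--         diff.insert(0, obst_idx[0]) #beginning
--         diff.insert(len(diff), len(data)-obst_idx[-1]-1) # ending
--         return sum(map(min_jumps, diff)) - 1
--     return min_jumps(len(data)) - 1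
-- ===== SOURCE B (Python) =====
-- def jump_on_clouds(data):
--     jumps = 0
--     run = 0
--     for v in data:
--         if v == 1:
--             jumps += run // 2 + 1
--             run = 0
--         else:
--             run += 1
--     return jumps + run // 2
-- ===== Notes on version B (the rewrite author's own statement) =====
-- stated objective: simpler
-- what changed: Replaced the three intermediate lists (enumerate-filter index list, consecutive-difference list with two inserts, mapped sum) by one streaming pass keeping a jump accumulator and a run-length counter.
import Mathlib
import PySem

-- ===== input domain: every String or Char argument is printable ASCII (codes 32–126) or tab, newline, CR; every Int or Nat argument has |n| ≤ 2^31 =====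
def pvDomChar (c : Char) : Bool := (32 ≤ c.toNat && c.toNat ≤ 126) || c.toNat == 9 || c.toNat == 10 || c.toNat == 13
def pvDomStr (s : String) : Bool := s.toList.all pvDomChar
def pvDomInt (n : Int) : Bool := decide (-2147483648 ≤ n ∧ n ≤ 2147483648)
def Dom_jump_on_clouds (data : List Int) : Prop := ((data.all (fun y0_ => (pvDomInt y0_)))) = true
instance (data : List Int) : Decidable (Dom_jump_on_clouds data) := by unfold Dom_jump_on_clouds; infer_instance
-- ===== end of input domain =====

-- B is a single streaming pass (jump accumulator + run counter) replacing A's three intermediate lists; same return value everywhere.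

-- ===== PORT A =====
def min_jumps (clouds : Int) : Int := PySem.Int.floordiv clouds 2 + 1

def jump_on_clouds (data : List Int) : Int :=
  let obst_idx : List Int :=
    ((PySem.List.enumerate data 0).filter (fun p => p.2 == 1)).map (fun p => p.1)
  if obst_idx.length > 0 then
    let diff0 : List Int := (PySem.List.pyRange 0 ((obst_idx.length : Int) - 1) 1).map
      (fun i => PySem.List.pyGetD obst_idx (i + 1) 0 - PySem.List.pyGetD obst_idx i 0 - 1)
    -- Python rebinds `diff` in place; the successive values are named diff0/diff1/diff2 here
    let diff1 : List Int := PySem.List.insert diff0 0 (PySem.List.pyGetD obst_idx 0 0)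
    let diff2 : List Int := PySem.List.insert diff1 (diff1.length : Int)
      ((data.length : Int) - PySem.List.pyGetD obst_idx (-1) 0 - 1)
    (diff2.map min_jumps).sum - 1
  else
    min_jumps (data.length) - 1

-- ===== PORT B =====
def jump_on_clouds_alt (data : List Int) : Int :=
  let s : Int × Int := data.foldl
    (fun (st : Int × Int) v =>
      if v == 1 then (st.1 + PySem.Int.floordiv st.2 2 + 1, 0) else (st.1, st.2 + 1))
    (0, 0)
  s.1 + PySem.Int.floordiv s.2 2

-- ===== PRECONDITION & SPEC =====
def Spec_jump_on_clouds (data : List Int) (out : Int) : Prop := out = jump_on_clouds_alt data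
instance (data : List Int) (out : Int) : Decidable (Spec_jump_on_clouds data out) := by unfold Spec_jump_on_clouds; infer_instance

-- ===== CLAIM (what is proved, stated in full; the proofs are below) =====
def Claim_equal_jump_on_clouds : Prop := ∀ (data : List Int), Dom_jump_on_clouds data → Spec_jump_on_clouds data (jump_on_clouds data)

-- ===== LEMMAS AND PROOFS =====

-- indices of the obstacles (value 1), relative form
def oidx : List Int → List Int
  | [] => []
  | c :: t => if c = 1 then 0 :: (oidx t).map (· + 1) else (oidx t).map (· + 1)

-- A's arithmetic block as a function of len(data) and the obstacle-index list
def gA (n : Int) (idxs : List Int) : Int :=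
  if idxs.length > 0 then
    let diff0 : List Int := (PySem.List.pyRange 0 ((idxs.length : Int) - 1) 1).map
      (fun i => PySem.List.pyGetD idxs (i + 1) 0 - PySem.List.pyGetD idxs i 0 - 1)
    let diff1 : List Int := PySem.List.insert diff0 0 (PySem.List.pyGetD idxs 0 0)
    let diff2 : List Int := PySem.List.insert diff1 (diff1.length : Int)
      (n - PySem.List.pyGetD idxs (-1) 0 - 1)
    (diff2.map min_jumps).sum - 1
  else
    min_jumps n - 1

-- B's remaining computation from an intermediate run counter
def Bloop (r : Int) : List Int → Int
  | [] => PySem.Int.floordiv r 2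
  | c :: t => if c = 1 then PySem.Int.floordiv r 2 + 1 + Bloop 0 t else Bloop (r + 1) t

theorem map_shift_shift (l : List Int) (a b : Int) :
    (l.map (· + a)).map (· + b) = l.map (· + (b + a)) := by
  induction l with
  | nil => rfl
  | cons h t ih => simp only [List.map_cons, ih, List.cons.injEq]; exact ⟨by ring, trivial⟩

theorem map_shift_cancel (l : List Int) (a : Int) :
    (l.map (· + a)).map (· - a) = l := by
  induction l with
  | nil => rfl
  | cons h t ih => simp only [List.map_cons, ih, List.cons.injEq]; exact ⟨by ring, trivial⟩

theorem map_add_zero (l : List Int) : l.map (· + (0 : Int)) = l := by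
  induction l with
  | nil => rfl
  | cons h t ih => simp only [List.map_cons, ih, List.cons.injEq]; exact ⟨by ring, trivial⟩

theorem zipWith_sub_shift (l1 l2 : List Int) (a : Int) :
    List.zipWith (fun b x => b - x - 1) (l1.map (· - a)) (l2.map (· - a))
      = List.zipWith (fun b x => b - x - 1) l1 l2 := by
  induction l1 generalizing l2 with
  | nil => simp
  | cons h t ih =>
    cases l2 with
    | nil => simp
    | cons y t2 =>
      simp only [List.map_cons, List.zipWith_cons_cons, ih, List.cons.injEq]
      exact ⟨by ring, trivial⟩

theorem getLast?_map_sub (l : List Int) (a : Int) :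
    (l.map (· - a)).getLast? = l.getLast?.map (· - a) := by
  induction l with
  | nil => rfl
  | cons x t ih =>
    cases t with
    | nil => rfl
    | cons y t2 => simpa [List.getLast?_cons_cons] using ih

theorem getLast_map_sub (l : List Int) (a : Int) (h : l ≠ []) :
    (l.map (· - a)).getLast (by simpa using h) = l.getLast h - a := by
  apply Option.some.inj
  rw [← List.getLast?_eq_some_getLast (show l.map (· - a) ≠ [] by simpa using h),
      getLast?_map_sub, List.getLast?_eq_some_getLast h]
  rfl

theorem enum_filter_map (l : List Int) (s : Int) :
    ((PySem.List.enumerate l s).filter (fun p => p.2 == 1)).map (fun p => p.1)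
      = (oidx l).map (· + s) := by
  induction l generalizing s with
  | nil => simp [PySem.List.enumerate_nil, oidx]
  | cons c t ih =>
    by_cases hc : c = 1
    · rw [PySem.List.enumerate_cons, List.filter_cons, if_pos (by simp [hc]),
        List.map_cons, ih (s + 1)]
      simp only [oidx, if_pos hc, List.map_cons, map_shift_shift]
      simp
    · rw [PySem.List.enumerate_cons, List.filter_cons,
        if_neg (by simp [hc]), ih (s + 1)]
      simp only [oidx, if_neg hc, map_shift_shift]

theorem jump_eq_gA (data : List Int) :
    jump_on_clouds data = gA (data.length) (oidx data) := by
  simp only [jump_on_clouds, gA, enum_filter_map data 0, map_add_zero]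

theorem diff_eq_zipWith (l : List Int) :
    (PySem.List.pyRange 0 ((l.length : Int) - 1) 1).map
      (fun i => PySem.List.pyGetD l (i + 1) 0 - PySem.List.pyGetD l i 0 - 1)
      = List.zipWith (fun b x => b - x - 1) l.tail l := by
  cases l with
  | nil => simp [PySem.List.pyRange_one_eq_nil]
  | cons x t =>
    have hb : ((x :: t).length : Int) - 1 = (t.length : Int) := by
      push_cast [List.length_cons]; ring
    rw [hb, PySem.List.pyRange_one, List.map_map]
    apply List.ext_getElem
    · simp
    · intro k hk1 hk2
      have hkt : k < t.length := by simpa using hk1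
      have e0 : (0 : Int) + ((List.range (((t.length : Int) - 0).toNat))[k]'(by simpa using hkt) : Int)
          = (k : Int) := by
        simp
      simp only [List.getElem_map, Function.comp_apply, List.getElem_zipWith]
      rw [List.getElem_range]
      have e1 : (0 : Int) + (k : Int) + 1 = ((k + 1 : Nat) : Int) := by push_cast; ring
      have e2 : (0 : Int) + (k : Int) = ((k : Nat) : Int) := by ring
      rw [e1, e2, PySem.List.pyGetD_natCast, PySem.List.pyGetD_natCast]
      rw [List.getD_eq_getElem _ _ (by simpa using Nat.succ_lt_succ hkt),
          List.getD_eq_getElem _ _ (by simp; omega)]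
      simp [List.getElem_cons_succ]

theorem insert_end (xs : List Int) (v : Int) :
    PySem.List.insert xs (xs.length : Int) v = xs ++ [v] := by
  exact PySem.List.insert_len xs v

theorem gA_rec (n i : Int) (rest : List Int) :
    gA n (i :: rest) = PySem.Int.floordiv i 2 + 1
      + gA (n - i - 1) (rest.map (· - (i + 1))) := by
  cases rest with
  | nil =>
    have h1 : PySem.List.pyRange 0 ((([i] : List Int).length : Int) - 1) 1 = [] := by
      apply PySem.List.pyRange_one_eq_nil; simp
    have h2 : ∀ v : Int, PySem.List.insert ([i] : List Int) (1 : Int) v = [i, v] := by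
      intro v; simpa using insert_end [i] v
    simp only [gA, if_pos (show ([i] : List Int).length > 0 by simp),
      if_neg (show ¬ (([] : List Int).length > 0) by simp), h1, List.map_nil,
      PySem.List.insert_zero, PySem.List.pyGetD_zero_cons,
      PySem.List.pyGetD_neg_one _ _ (by simp : ([i] : List Int) ≠ [])]
    simp [h2, List.getLast_singleton, min_jumps]
    ring
  | cons j rest2 =>
    have hne : (j :: rest2) ≠ ([] : List Int) := by simp
    have hne' : ((j :: rest2).map (· - (i + 1))) ≠ ([] : List Int) := by simp
    have hL : gA n (i :: j :: rest2)
        = (((i :: List.zipWith (fun b x => b - x - 1) (j :: rest2) (i :: j :: rest2))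
            ++ [n - (j :: rest2).getLast hne - 1]).map min_jumps).sum - 1 := by
      simp only [gA, if_pos (show (i :: j :: rest2).length > 0 by simp)]
      rw [diff_eq_zipWith (i :: j :: rest2)]
      rw [show PySem.List.pyGetD (i :: j :: rest2) 0 0 = i from PySem.List.pyGetD_zero_cons _ _ _]
      rw [PySem.List.insert_zero]
      rw [PySem.List.pyGetD_neg_one _ _ (by simp : (i :: j :: rest2) ≠ [])]
      rw [show (i :: j :: rest2).getLast (by simp) = (j :: rest2).getLast hne from
        List.getLast_cons hne]
      rw [insert_end]
      simp [List.tail]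
    have hR : gA (n - i - 1) ((j :: rest2).map (· - (i + 1)))
        = ((((j - (i + 1)) :: List.zipWith (fun b x => b - x - 1) (rest2.map (· - (i + 1)))
              ((j :: rest2).map (· - (i + 1))))
            ++ [(n - i - 1) - ((j :: rest2).getLast hne - (i + 1)) - 1]).map min_jumps).sum - 1 := by
      simp only [gA, if_pos (show ((j :: rest2).map (· - (i + 1))).length > 0 by simp)]
      rw [diff_eq_zipWith (((j :: rest2).map (· - (i + 1))))]
      rw [show PySem.List.pyGetD ((j :: rest2).map (· - (i + 1))) 0 0 = j - (i + 1) from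
        by rw [List.map_cons]; exact PySem.List.pyGetD_zero_cons _ _ _]
      rw [PySem.List.insert_zero]
      rw [PySem.List.pyGetD_neg_one _ _ hne']
      rw [getLast_map_sub (j :: rest2) (i + 1) hne]
      rw [insert_end]
      simp [List.tail]
    rw [hL, hR, zipWith_sub_shift]
    rw [show List.zipWith (fun b x => b - x - 1) (j :: rest2) (i :: j :: rest2)
        = (j - i - 1) :: List.zipWith (fun b x => b - x - 1) rest2 (j :: rest2) from by
      rw [List.zipWith_cons_cons]]
    simp only [List.map_cons, List.map_append, List.sum_cons, List.sum_append,
      List.map_nil, List.sum_nil, min_jumps]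
    have e1 : j - (i + 1) = j - i - 1 := by ring
    have e2 : (n - i - 1) - ((j :: rest2).getLast hne - (i + 1)) - 1
        = n - (j :: rest2).getLast hne - 1 := by ring
    rw [e1, e2]
    ring

theorem gA_oidx (l : List Int) (r : Int) :
    gA (r + l.length) ((oidx l).map (· + r)) = Bloop r l := by
  induction l generalizing r with
  | nil =>
    simp [oidx, gA, Bloop, min_jumps]
  | cons c t ih =>
    by_cases hc : c = 1
    · rw [show oidx (c :: t) = 0 :: (oidx t).map (· + 1) from by simp [oidx, hc]]
      rw [List.map_cons, map_shift_shift]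
      rw [show (0 : Int) + r = r from by ring]
      rw [gA_rec, map_shift_cancel]
      have hn : r + ((c :: t).length : Int) - r - 1 = 0 + (t.length : Int) := by
        push_cast [List.length_cons]; ring
      rw [hn]
      have ih0 := ih 0
      rw [map_add_zero] at ih0
      rw [ih0]
      simp [Bloop, hc]
    · rw [show oidx (c :: t) = (oidx t).map (· + 1) from by simp [oidx, hc]]
      rw [map_shift_shift]
      have hn : r + ((c :: t).length : Int) = (r + 1) + (t.length : Int) := by
        push_cast [List.length_cons]; ring
      rw [hn, ih (r + 1)]
      simp [Bloop, hc]

theorem alt_eq_Bloop (l : List Int) (j r : Int) :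
    (l.foldl
      (fun (st : Int × Int) v =>
        if v == 1 then (st.1 + PySem.Int.floordiv st.2 2 + 1, 0) else (st.1, st.2 + 1))
      (j, r)).1
    + PySem.Int.floordiv (l.foldl
      (fun (st : Int × Int) v =>
        if v == 1 then (st.1 + PySem.Int.floordiv st.2 2 + 1, 0) else (st.1, st.2 + 1))
      (j, r)).2 2
    = j + Bloop r l := by
  induction l generalizing j r with
  | nil => simp [Bloop]
  | cons c t ih =>
    by_cases hc : c = 1
    · have hb : (c == 1) = true := by simp [hc]
      rw [List.foldl_cons, if_pos hb, ih]
      simp only [Bloop, if_pos hc]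
      ring
    · have hb : ¬ ((c == 1) = true) := by simp [hc]
      rw [List.foldl_cons, if_neg hb, ih]
      simp only [Bloop, if_neg hc]

-- ===== VERDICT (by name: the statement is the Claim_ definition above) =====
theorem jump_on_clouds_spec : Claim_equal_jump_on_clouds := by
  intro data _
  unfold Spec_jump_on_clouds
  rw [jump_eq_gA]
  have h0 := gA_oidx data 0
  rw [map_add_zero, zero_add] at h0
  rw [h0]
  simp only [jump_on_clouds_alt]
  have h1 := alt_eq_Bloop data 0 0
  rw [zero_add] at h1
  exact h1.symm
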